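-- pv_equiv track=rewrite | github.com/gkuwanto/wiki_pipeline | preprocess_wiki_dict/get_dictionary.py | similar_sentences
-- ===== SOURCE A (Python) =====
-- def similar_sentences(sentences_1, href_links_1, sentences_2, href_links_2, threshold=2):
--     """Summary or Description of the Function
--
--     Parameters:
--     sentences_1 list(string): A list of sentences
--     href_links_1 list(list(string)): A list of url from the sentences
--     sentences_2 list(string): A list of sentences
--     href_links_2 list(list(string)): A list of url from the sentences
--
--     Returns:
--     list: a list of tuples of sentences with common
--     """
--     returned_sentence_pair = []
--     for sent_1, links_1 in zip(sentences_1, href_links_1):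
--         if len(links_1):
--             for sent_2, links_2 in zip(sentences_2, href_links_2):
--                 if len(links_2):
--                     if len(links_1.intersection(links_2)) >= threshold:
--                         returned_sentence_pair.append((sent_1, sent_2))
--                         break
--     return returned_sentence_pair
-- ===== SOURCE B (Python) =====
-- def similar_sentences(sentences_1, href_links_1, sentences_2, href_links_2, threshold=2):
--     """Inverted index from link -> indices of sentences_2 containing it; per
--     sentence_1, merge the postings of its links into per-index overlap counts
--     and take the earliest candidate reaching the threshold."""
--     index = {}
--     nonempty = []
--     for j, (_, links_2) in enumerate(zip(sentences_2, href_links_2)):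
--         if links_2:
--             nonempty.append(j)
--             for link in links_2:
--                 index.setdefault(link, []).append(j)
--     result = []
--     for sent_1, links_1 in zip(sentences_1, href_links_1):
--         if links_1:
--             counts = {}
--             for link in links_1:
--                 for j in index.get(link, ()):
--                     counts[j] = counts.get(j, 0) + 1
--             for j in nonempty:
--                 if counts.get(j, 0) >= threshold:
--                     result.append((sent_1, sentences_2[j]))
--                     break
--     return result
-- ===== Notes on version B (the rewrite author's own statement) =====
-- stated objective: faster
-- what changed: Replaces the per-pair set intersection of the nested scan by an inverted index link->sentence2 indices built once; each sentence_1 merges the postings of its own links into per-index overlap counts and picks the earliest candidate index reaching the threshold, so no intersection of link sets is ever computed.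
import Mathlib
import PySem

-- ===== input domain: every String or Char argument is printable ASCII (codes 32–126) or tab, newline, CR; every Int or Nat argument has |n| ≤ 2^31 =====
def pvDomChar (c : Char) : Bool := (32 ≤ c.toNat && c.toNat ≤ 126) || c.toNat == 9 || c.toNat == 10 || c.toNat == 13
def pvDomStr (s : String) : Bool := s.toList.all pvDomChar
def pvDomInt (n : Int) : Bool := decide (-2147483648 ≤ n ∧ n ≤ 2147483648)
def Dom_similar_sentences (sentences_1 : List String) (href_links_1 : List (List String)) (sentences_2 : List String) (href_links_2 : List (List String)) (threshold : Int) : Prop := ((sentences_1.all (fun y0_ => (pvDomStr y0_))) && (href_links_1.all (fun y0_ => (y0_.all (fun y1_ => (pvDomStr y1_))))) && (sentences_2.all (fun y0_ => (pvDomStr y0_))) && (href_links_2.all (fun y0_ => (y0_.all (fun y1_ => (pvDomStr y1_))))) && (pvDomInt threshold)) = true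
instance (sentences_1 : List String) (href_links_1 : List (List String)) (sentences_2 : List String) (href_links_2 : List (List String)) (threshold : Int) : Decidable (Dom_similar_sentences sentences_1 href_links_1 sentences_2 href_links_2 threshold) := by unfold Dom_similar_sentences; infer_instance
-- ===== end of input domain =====

-- B replaces A's nested scan with per-pair set intersections by an inverted index link -> indices of
-- sentences_2, merging postings into per-index overlap counts per sentence_1 (objective: faster).

-- ===== PORT A =====
-- inner loop: 'for sent_2, links_2 in zip(…): if len(links_2): if len(links_1 ∩ links_2) >= threshold: append; break'
def aScan2 (links_1 : List String) (threshold : Int) : List (String × List String) → Option String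
  | [] => none
  | (sent_2, links_2) :: rest =>
    if links_2.length ≠ 0 then
      if threshold ≤ ((PySem.Set.inter links_1 links_2).length : Int) then some sent_2
      else aScan2 links_1 threshold rest
    else aScan2 links_1 threshold rest

def similar_sentences (sentences_1 : List String) (href_links_1 : List (List String)) (sentences_2 : List String) (href_links_2 : List (List String)) (threshold : Int) : List (String × String) :=
  (sentences_1.zip href_links_1).foldl
    (fun acc p =>
      if p.2.length ≠ 0 then
        match aScan2 p.2 threshold (sentences_2.zip href_links_2) with
        | some sent_2 => acc ++ [(p.1, sent_2)]
        | none => acc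
      else acc) []

-- ===== PORT B =====
-- 'for j, (_, links_2) in enumerate(zip(sentences_2, href_links_2)): if links_2: nonempty.append(j);
--  for link in links_2: index.setdefault(link, []).append(j)'  — returns (index, nonempty)
def bBuild (pairs : List (String × List String)) : PySem.Dict String (List Int) × List Int :=
  (PySem.List.enumerate pairs 0).foldl
    (fun st jp =>
      if jp.2.2.length ≠ 0 then
        (jp.2.2.foldl (fun d link => d.insert link (d.getD link [] ++ [jp.1])) st.1, st.2 ++ [jp.1])
      else st)
    (PySem.Dict.empty, [])

-- 'for link in links_1: for j in index.get(link, ()): counts[j] = counts.get(j, 0) + 1'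
def bCounts (index : PySem.Dict String (List Int)) (links_1 : List String) : PySem.Dict Int Int :=
  links_1.foldl (fun c link => (index.getD link []).foldl (fun c j => c.insert j (c.getD j 0 + 1)) c)
    PySem.Dict.empty

def similar_sentences_alt (sentences_1 : List String) (href_links_1 : List (List String)) (sentences_2 : List String) (href_links_2 : List (List String)) (threshold : Int) : List (String × String) :=
  let st := bBuild (sentences_2.zip href_links_2)
  (sentences_1.zip href_links_1).foldl
    (fun acc p =>
      if p.2.length ≠ 0 then
        let counts := bCounts st.1 p.2
        -- 'for j in nonempty: if counts.get(j, 0) >= threshold: result.append(…); break'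
        match st.2.find? (fun j => decide (threshold ≤ counts.getD j 0)) with
        | some j => acc ++ [(p.1, PySem.List.pyGetD sentences_2 j "")]
        | none => acc
      else acc) []

-- ===== PRECONDITION & SPEC =====
-- Pre_ only requires the List encodings of the Python sets in href_links_2 to be duplicate-free,
-- as every Python set is: a list with duplicates encodes no set, so A's behaviour there is not modelled.
def Pre_similar_sentences (sentences_1 : List String) (href_links_1 : List (List String)) (sentences_2 : List String) (href_links_2 : List (List String)) (threshold : Int) : Prop :=
  ∀ l ∈ href_links_2, l.Nodup
instance (sentences_1 : List String) (href_links_1 : List (List String)) (sentences_2 : List String) (href_links_2 : List (List String)) (threshold : Int) : Decidable (Pre_similar_sentences sentences_1 href_links_1 sentences_2 href_links_2 threshold) := by unfold Pre_similar_sentences; infer_instance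

def pvWitness_similar_sentences : List String × List (List String) × List String × List (List String) × Int :=
  (["a"], [["x", "y"]], ["b"], [["x", "y"]], 2)

def Spec_similar_sentences (sentences_1 : List String) (href_links_1 : List (List String)) (sentences_2 : List String) (href_links_2 : List (List String)) (threshold : Int) (out : List (String × String)) : Prop := out = similar_sentences_alt sentences_1 href_links_1 sentences_2 href_links_2 threshold
instance (sentences_1 : List String) (href_links_1 : List (List String)) (sentences_2 : List String) (href_links_2 : List (List String)) (threshold : Int) (out : List (String × String)) : Decidable (Spec_similar_sentences sentences_1 href_links_1 sentences_2 href_links_2 threshold out) := by unfold Spec_similar_sentences; infer_instance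

-- ===== CLAIM (what is proved, stated in full; the proofs are below) =====
def Claim_equal_similar_sentences : Prop := ∀ (sentences_1 : List String) (href_links_1 : List (List String)) (sentences_2 : List String) (href_links_2 : List (List String)) (threshold : Int), Dom_similar_sentences sentences_1 href_links_1 sentences_2 href_links_2 threshold → Pre_similar_sentences sentences_1 href_links_1 sentences_2 href_links_2 threshold → Spec_similar_sentences sentences_1 href_links_1 sentences_2 href_links_2 threshold (similar_sentences sentences_1 href_links_1 sentences_2 href_links_2 threshold)

-- ===== LEMMAS AND PROOFS =====

-- postings that bBuild accumulates for a link x : each index once per occurrence of x in that row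
def posts (x : String) : List (String × List String) → Int → List Int
  | [], _ => []
  | p :: rest, s => List.replicate (p.2.count x) s ++ posts x rest (s + 1)

lemma foldl_insert_append_getD (x : String) (j : Int) (links : List String) :
    ∀ d : PySem.Dict String (List Int),
      (links.foldl (fun d link => d.insert link (d.getD link [] ++ [j])) d).getD x []
        = d.getD x [] ++ List.replicate (links.count x) j := by
  induction links with
  | nil => intro d; simp
  | cons a rest ih =>
    intro d
    rw [List.foldl_cons, ih, List.count_cons]
    by_cases hx : x = a
    · subst hx
      rw [PySem.Dict.getD_insert, if_pos rfl, if_pos (show (x == x) = true by simp)]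
      simp [List.replicate_succ, List.append_assoc]
    · rw [PySem.Dict.getD_insert, if_neg hx]
      have hax : (a == x) = false := beq_eq_false_iff_ne.mpr (fun hh => hx hh.symm)
      simp [hax]

lemma bBuild_fold_fst (x : String) (pairs : List (String × List String)) :
    ∀ (s : Int) (d : PySem.Dict String (List Int)) (acc : List Int),
      (((PySem.List.enumerate pairs s).foldl
          (fun st jp =>
            if jp.2.2.length ≠ 0 then
              (jp.2.2.foldl (fun d link => d.insert link (d.getD link [] ++ [jp.1])) st.1, st.2 ++ [jp.1])
            else st)
          (d, acc)).1).getD x []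
        = d.getD x [] ++ posts x pairs s := by
  induction pairs with
  | nil => intro s d acc; simp [PySem.List.enumerate_nil, posts]
  | cons p rest ih =>
    intro s d acc
    rw [PySem.List.enumerate_cons]
    simp only [List.foldl_cons]
    by_cases h : p.2.length ≠ 0
    · rw [if_pos h, ih, foldl_insert_append_getD]
      simp [posts, List.append_assoc]
    · have hp : p.2 = [] := by simpa using h
      rw [if_neg h, ih]
      simp [posts, hp]

lemma bBuild_fold_snd (pairs : List (String × List String)) :
    ∀ (s : Int) (d : PySem.Dict String (List Int)) (acc : List Int),
      ((PySem.List.enumerate pairs s).foldl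
          (fun st jp =>
            if jp.2.2.length ≠ 0 then
              (jp.2.2.foldl (fun d link => d.insert link (d.getD link [] ++ [jp.1])) st.1, st.2 ++ [jp.1])
            else st)
          (d, acc)).2
        = acc ++ ((PySem.List.enumerate pairs s).filter (fun jp => decide (jp.2.2.length ≠ 0))).map (·.1) := by
  induction pairs with
  | nil => intro s d acc; simp [PySem.List.enumerate_nil]
  | cons p rest ih =>
    intro s d acc
    rw [PySem.List.enumerate_cons]
    by_cases h : p.2.length ≠ 0
    · simp only [List.foldl_cons, h, ite_true, List.filter_cons, decide_eq_true_eq, if_pos h,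
        List.map_cons]
      rw [ih]
      simp [List.append_assoc]
    · simp only [List.foldl_cons, h, ite_false, List.filter_cons, decide_eq_true_eq, if_neg h]
      exact ih _ _ _

lemma bBuild_fst_getD (pairs : List (String × List String)) (x : String) :
    (bBuild pairs).1.getD x [] = posts x pairs 0 := by
  unfold bBuild
  rw [bBuild_fold_fst]
  rfl

lemma bBuild_snd (pairs : List (String × List String)) :
    (bBuild pairs).2
      = ((PySem.List.enumerate pairs 0).filter (fun jp => decide (jp.2.2.length ≠ 0))).map (·.1) := by
  unfold bBuild
  rw [bBuild_fold_snd]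
  rfl

lemma posts_count_lt (x : String) (pairs : List (String × List String)) :
    ∀ (s j : Int), j < s → (posts x pairs s).count j = 0 := by
  induction pairs with
  | nil => intro s j _; simp [posts]
  | cons p rest ih =>
    intro s j hj
    simp [posts, List.count_append, List.count_replicate, ih (s + 1) j (by omega)]
    all_goals (intro hc; exfalso; omega)

lemma posts_count (x : String) (pairs : List (String × List String)) :
    ∀ (s : Int) (k : Nat), (hk : k < pairs.length) →
      (posts x pairs s).count (s + (k : Int)) = pairs[k].2.count x := by
  induction pairs with
  | nil => intro s k hk; simp at hk
  | cons p rest ih =>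
    intro s k hk
    cases k with
    | zero =>
      have h0 : s + ((0 : Nat) : Int) = s := by simp
      simp only [posts, List.count_append, h0]
      rw [posts_count_lt x rest (s + 1) s (by omega)]
      simp [List.count_replicate]
    | succ k' =>
      have hsh : s + ((k' + 1 : Nat) : Int) = (s + 1) + (k' : Int) := by push_cast; ring
      simp only [posts, List.count_append, List.count_replicate]
      rw [hsh, ih (s + 1) k' (by simpa using Nat.lt_of_succ_lt_succ hk)]
      simp
      all_goals (intro hc; exfalso; omega)

lemma counts_inner (j : Int) (js : List Int) :
    ∀ c : PySem.Dict Int Int,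
      (js.foldl (fun c j' => c.insert j' (c.getD j' 0 + 1)) c).getD j 0
        = c.getD j 0 + (js.count j : Int) := by
  induction js with
  | nil => intro c; simp
  | cons a rest ih =>
    intro c
    rw [List.foldl_cons, ih, List.count_cons]
    by_cases h : j = a
    · subst h
      rw [PySem.Dict.getD_insert, if_pos rfl, if_pos (show (j == j) = true by simp)]
      push_cast
      ring
    · rw [PySem.Dict.getD_insert, if_neg h]
      have haj : (a == j) = false := beq_eq_false_iff_ne.mpr (fun hh => h hh.symm)
      simp [haj]

lemma counts_getD (idx : PySem.Dict String (List Int)) (j : Int) (l1 : List String) :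
    (bCounts idx l1).getD j 0 = (l1.map (fun x => ((idx.getD x []).count j : Int))).sum := by
  unfold bCounts
  suffices h : ∀ c : PySem.Dict Int Int,
      (l1.foldl (fun c link => (idx.getD link []).foldl (fun c j' => c.insert j' (c.getD j' 0 + 1)) c) c).getD j 0
        = c.getD j 0 + (l1.map (fun x => ((idx.getD x []).count j : Int))).sum by
    rw [h]; simp
  induction l1 with
  | nil => intro c; simp
  | cons a rest ih =>
    intro c
    rw [List.foldl_cons, ih, counts_inner]
    simp [add_assoc]

lemma sum_count_eq_countP (l2 : List String) (hnd : l2.Nodup) (l1 : List String) :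
    (l1.map (fun x => (l2.count x : Int))).sum = (l1.countP (fun x => l2.contains x) : Int) := by
  induction l1 with
  | nil => simp
  | cons a rest ih =>
    rw [List.map_cons, List.sum_cons, ih, List.countP_cons]
    by_cases ha : a ∈ l2
    · have h2 : l2.contains a = true := by simpa using ha
      rw [List.count_eq_one_of_mem hnd ha, if_pos h2]
      push_cast
      ring
    · have h2 : ¬(l2.contains a = true) := by simpa using ha
      rw [List.count_eq_zero_of_not_mem ha, if_neg h2]
      simp

lemma inter_length_eq_countP (l1 l2 : List String) :
    (PySem.Set.inter l1 l2).length = l1.countP (fun x => l2.contains x) := by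
  induction l1 with
  | nil => rfl
  | cons a rest ih =>
    have ih' : (List.filter (fun x => PySem.Set.contains l2 x) rest).length
        = List.countP (fun x => l2.contains x) rest := ih
    show (List.filter (fun x => PySem.Set.contains l2 x) (a :: rest)).length
        = List.countP (fun x => l2.contains x) (a :: rest)
    rw [List.filter_cons, List.countP_cons]
    by_cases ha : a ∈ l2
    · have hc : PySem.Set.contains l2 a = true := by simp [ha]
      have hc2 : (l2.contains a) = true := by simpa using ha
      rw [if_pos hc, if_pos hc2]
      simp
      simpa using ih'
    · have hc : ¬(PySem.Set.contains l2 a = true) := by simp [ha]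
      have hc2 : ¬((l2.contains a) = true) := by simpa using ha
      rw [if_neg hc, if_neg hc2]
      simp
      simpa using ih'

lemma aScan2_eq_find? (l1 : List String) (t : Int) :
    ∀ pairs : List (String × List String),
      aScan2 l1 t pairs
        = (pairs.find? (fun p => decide (p.2.length ≠ 0 ∧ t ≤ ((PySem.Set.inter l1 p.2).length : Int)))).map (·.1) := by
  intro pairs
  induction pairs with
  | nil => rfl
  | cons p rest ih =>
    obtain ⟨s2, l2⟩ := p
    by_cases h1 : l2.length ≠ 0
    · have h1' : ¬(l2 = []) := by simpa using h1
      by_cases h2 : t ≤ ((PySem.Set.inter l1 l2).length : Int)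
      · simp [aScan2, List.find?_cons, h1, h1', h2]
      · simp [aScan2, List.find?_cons, h1, h1', h2, ih]
    · have h1' : l2 = [] := by simpa using h1
      simp [aScan2, List.find?_cons, h1, h1', ih]

lemma find?_congr_mem {α : Type} (l : List α) (p q : α → Bool) (h : ∀ a ∈ l, p a = q a) :
    l.find? p = l.find? q := by
  induction l with
  | nil => rfl
  | cons a rest ih =>
    rw [List.find?_cons, List.find?_cons, h a List.mem_cons_self]
    cases hq : q a
    · exact ih (fun b hb => h b (List.mem_cons_of_mem a hb))
    · rfl

lemma find?_enumerate_snd {q : (String × List String) → Bool} (pairs : List (String × List String)) :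
    ∀ s : Int,
      ((PySem.List.enumerate pairs s).find? (fun jp => q jp.2)).map (·.2) = pairs.find? q := by
  induction pairs with
  | nil => intro s; simp [PySem.List.enumerate_nil]
  | cons p rest ih =>
    intro s
    rw [PySem.List.enumerate_cons, List.find?_cons, List.find?_cons]
    cases hq : q p
    · simpa using ih (s + 1)
    · rfl

-- the heart: per sentence_1, B's index/counts scan equals A's inner intersection scan
lemma key (sentences_2 : List String) (href_links_2 : List (List String)) (threshold : Int)
    (l1 : List String) (hnd : ∀ l ∈ href_links_2, l.Nodup) :
    ((bBuild (sentences_2.zip href_links_2)).2.find?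
        (fun j => decide (threshold ≤ (bCounts (bBuild (sentences_2.zip href_links_2)).1 l1).getD j 0))).map
        (fun j => PySem.List.pyGetD sentences_2 j "")
      = aScan2 l1 threshold (sentences_2.zip href_links_2) := by
  have hcount : ∀ (k : Nat) (hk : k < (sentences_2.zip href_links_2).length),
      (bCounts (bBuild (sentences_2.zip href_links_2)).1 l1).getD ((k : Nat) : Int) 0
        = (((PySem.Set.inter l1 (((sentences_2.zip href_links_2))[k]'hk).2).length) : Int) := by
    intro k hk
    have hkm : k < min sentences_2.length href_links_2.length := by
      have h := hk; rw [List.length_zip] at h; exact h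
    have hk2 : k < href_links_2.length := by omega
    have hks : k < sentences_2.length := by omega
    have hzz : ((sentences_2.zip href_links_2))[k]'hk = (sentences_2[k]'hks, href_links_2[k]'hk2) := by
      rw [List.getElem_zip]
    have hnd' : (((sentences_2.zip href_links_2))[k]'hk).2.Nodup := by
      rw [hzz]
      exact hnd _ (List.getElem_mem hk2)
    rw [counts_getD]
    have hpost : ∀ x : String,
        (((bBuild (sentences_2.zip href_links_2)).1.getD x []).count ((k : Nat) : Int))
          = ((((sentences_2.zip href_links_2))[k]'hk).2).count x := by
      intro x
      rw [bBuild_fst_getD]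
      have h := posts_count x (sentences_2.zip href_links_2) 0 k hk
      rw [show (0 : Int) + ((k : Nat) : Int) = ((k : Nat) : Int) by ring] at h
      exact h
    have hmap : l1.map (fun x => (((bBuild (sentences_2.zip href_links_2)).1.getD x []).count ((k : Nat) : Int) : Int))
        = l1.map (fun x => (((((sentences_2.zip href_links_2))[k]'hk).2).count x : Int)) := by
      apply List.map_congr_left
      intro x _
      rw [hpost x]
    rw [hmap, sum_count_eq_countP _ hnd' l1, inter_length_eq_countP]
  rw [bBuild_snd, List.find?_map, List.find?_filter]
  simp only [Function.comp, decide_eq_true_eq, Option.map_map]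
  have hpt : ∀ jp ∈ PySem.List.enumerate (sentences_2.zip href_links_2) 0,
      (decide (jp.2.2.length ≠ 0 ∧ threshold ≤ (bCounts (bBuild (sentences_2.zip href_links_2)).1 l1).getD jp.1 0))
        = (fun p => decide (p.2.length ≠ 0 ∧ threshold ≤ ((PySem.Set.inter l1 p.2).length : Int))) jp.2 := by
    intro jp hjp
    rw [PySem.List.mem_enumerate_iff] at hjp
    obtain ⟨k, hk, rfl⟩ := hjp
    simp only []
    rw [decide_eq_decide]
    rw [show (0 : Int) + ((k : Nat) : Int) = ((k : Nat) : Int) by ring, hcount k hk]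
  rw [find?_congr_mem _ _ _ hpt]
  rw [aScan2_eq_find?]
  have hsnd := find?_enumerate_snd
      (q := fun p => decide (p.2.length ≠ 0 ∧ threshold ≤ ((PySem.Set.inter l1 p.2).length : Int)))
      (sentences_2.zip href_links_2) 0
  rw [← hsnd, Option.map_map]
  cases hf : (PySem.List.enumerate (sentences_2.zip href_links_2) 0).find?
      (fun jp => (fun p => decide (p.2.length ≠ 0 ∧ threshold ≤ ((PySem.Set.inter l1 p.2).length : Int))) jp.2) with
  | none => rfl
  | some jp =>
    have hjp := List.mem_of_find?_eq_some hf
    rw [PySem.List.mem_enumerate_iff] at hjp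
    obtain ⟨k, hk, rfl⟩ := hjp
    have hks : k < sentences_2.length := by
      have h := hk; rw [List.length_zip] at h; omega
    show some (PySem.List.pyGetD sentences_2 ((0 : Int) + (k : Nat)) "")
      = some ((((sentences_2.zip href_links_2))[k]'hk).1)
    rw [show (0 : Int) + ((k : Nat) : Int) = ((k : Nat) : Int) by ring, PySem.List.pyGetD_natCast,
      List.getD_eq_getElem _ _ hks, List.getElem_zip]

-- ===== VERDICT (by name: the statement is the Claim_ definition above) =====
theorem similar_sentences_spec : Claim_equal_similar_sentences := by
  intro sentences_1 href_links_1 sentences_2 href_links_2 threshold _hdom hpre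
  unfold Spec_similar_sentences
  show List.foldl
      (fun acc p =>
        if p.2.length ≠ 0 then
          match aScan2 p.2 threshold (sentences_2.zip href_links_2) with
          | some sent_2 => acc ++ [(p.1, sent_2)]
          | none => acc
        else acc) [] (sentences_1.zip href_links_1)
    = List.foldl
      (fun acc p =>
        if p.2.length ≠ 0 then
          match (bBuild (sentences_2.zip href_links_2)).2.find?
              (fun j => decide (threshold ≤ (bCounts (bBuild (sentences_2.zip href_links_2)).1 p.2).getD j 0)) with
          | some j => acc ++ [(p.1, PySem.List.pyGetD sentences_2 j "")]
          | none => acc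
        else acc) [] (sentences_1.zip href_links_1)
  have hfe : (fun (acc : List (String × String)) (p : String × List String) =>
        if p.2.length ≠ 0 then
          match aScan2 p.2 threshold (sentences_2.zip href_links_2) with
          | some sent_2 => acc ++ [(p.1, sent_2)]
          | none => acc
        else acc)
      = (fun (acc : List (String × String)) (p : String × List String) =>
        if p.2.length ≠ 0 then
          match (bBuild (sentences_2.zip href_links_2)).2.find?
              (fun j => decide (threshold ≤ (bCounts (bBuild (sentences_2.zip href_links_2)).1 p.2).getD j 0)) with
          | some j => acc ++ [(p.1, PySem.List.pyGetD sentences_2 j "")]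
          | none => acc
        else acc) := by
    funext acc p
    by_cases hp : p.2.length ≠ 0
    · rw [if_pos hp, if_pos hp]
      have hkey := key sentences_2 href_links_2 threshold p.2 hpre
      cases hfind : (bBuild (sentences_2.zip href_links_2)).2.find?
          (fun j => decide (threshold ≤ (bCounts (bBuild (sentences_2.zip href_links_2)).1 p.2).getD j 0)) with
      | none =>
        rw [hfind] at hkey
        rw [show Option.map (fun j => PySem.List.pyGetD sentences_2 j "") (none : Option Int) = none from rfl] at hkey
        rw [← hkey]
      | some j =>
        rw [hfind] at hkey
        rw [show Option.map (fun j => PySem.List.pyGetD sentences_2 j "") (some j)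
            = some (PySem.List.pyGetD sentences_2 j "") from rfl] at hkey
        rw [← hkey]
    · rw [if_neg hp, if_neg hp]
  rw [hfe]
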